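-- pv_equiv track=rewrite | github.com/lyubovchubarova/tajik_spellchecker | create_dataset/utils.py | create_distances_dict
-- ===== SOURCE A (Python) =====
-- from typing import Dict, Tuple
--
-- def distance_between_symbols(symbol1: str,
--                              symbol2: str,
--                              qwerty_positions: Dict[str, Tuple]) -> int:
--     """Returns the relative distance between two symbols on qwerty keybord"""
--     symbol1_x, symbol1_y = qwerty_positions[symbol1][0], qwerty_positions[symbol1][1]
--     symbol2_x, symbol2_y = qwerty_positions[symbol2][0], qwerty_positions[symbol2][1]
--     distance = abs(symbol1_x - symbol2_x) + abs(symbol1_y - symbol2_y)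
--
--     return distance
--
-- def create_distances_dict(qwerty_positions: Dict[str, Tuple[int, int]]) -> Dict[str, Dict[str, int]]:
--     """Returns the dict of symbols where each symbols maps with the other symbols and its relative distance.
--     The distance does not exceed 3"""
--     int_distances = {}
--
--     for symbol1 in qwerty_positions:
--         int_nested_distances = {}
--         for symbol2 in qwerty_positions:
--             int_nested_distances[symbol2] = distance_between_symbols(symbol1, symbol2, qwerty_positions)
--         int_distances[symbol1] = int_nested_distances
--
--     return int_distances
-- ===== SOURCE B (Python) =====
-- def create_distances_dict(qwerty_positions):
--     """Symmetric triangular pass: each unordered pair's distance is computed once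
--     and written to both mirrored entries; the diagonal is 0."""
--     items = list(qwerty_positions.items())
--     res = {s: {} for s, _ in items}
--     for i, (s1, (x1, y1)) in enumerate(items):
--         res[s1][s1] = 0
--         for s2, (x2, y2) in items[i + 1:]:
--             d = abs(x1 - x2) + abs(y1 - y2)
--             res[s1][s2] = d
--             res[s2][s1] = d
--     return res
-- ===== Notes on version B (the rewrite author's own statement) =====
-- stated objective: alternative
-- what changed: B exploits the symmetry of the Manhattan distance: it pre-initializes all rows and does one triangular pass over index pairs i<j, computing each pairwise distance once and writing both mirrored entries (with a zero diagonal), instead of A's full n×n double loop that recomputes every distance via dict lookups.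
import Mathlib
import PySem

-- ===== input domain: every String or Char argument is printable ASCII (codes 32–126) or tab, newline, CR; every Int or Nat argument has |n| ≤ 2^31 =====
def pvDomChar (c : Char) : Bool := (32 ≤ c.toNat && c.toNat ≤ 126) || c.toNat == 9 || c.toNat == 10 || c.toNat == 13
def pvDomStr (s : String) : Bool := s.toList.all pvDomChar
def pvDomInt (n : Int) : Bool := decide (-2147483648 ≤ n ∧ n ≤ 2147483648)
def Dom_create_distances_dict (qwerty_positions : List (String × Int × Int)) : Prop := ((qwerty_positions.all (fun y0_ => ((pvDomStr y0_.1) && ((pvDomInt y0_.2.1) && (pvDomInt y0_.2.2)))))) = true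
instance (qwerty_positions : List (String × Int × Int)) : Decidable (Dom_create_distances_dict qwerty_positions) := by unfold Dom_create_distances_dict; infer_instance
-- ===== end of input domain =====

-- B computes each unordered pair's Manhattan distance once (triangular pass writing both
-- mirrored entries and a zero diagonal) instead of A's full n×n double loop with dict lookups.

-- ===== PORT A =====
-- qwerty_positions[symbol] can never raise KeyError in A: both callers pass keys of the dict
-- itself, so getD's default is unreachable.
def distance_between_symbols (symbol1 symbol2 : String)
    (qwerty_positions : PySem.Dict String (Int × Int)) : Int :=
  let p1 := qwerty_positions.getD symbol1 (0, 0)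
  let p2 := qwerty_positions.getD symbol2 (0, 0)
  |p1.1 - p2.1| + |p1.2 - p2.2|

def create_distances_dict (qwerty_positions : List (String × Int × Int)) :
    List (String × List (String × Int)) :=
  let qp := PySem.Dict.ofList qwerty_positions
  let int_distances :=
    qp.keys.foldl (fun int_distances symbol1 =>
        int_distances.insert symbol1
          (qp.keys.foldl (fun int_nested_distances symbol2 =>
              int_nested_distances.insert symbol2 (distance_between_symbols symbol1 symbol2 qp))
            PySem.Dict.empty))
      PySem.Dict.empty
  int_distances.items.map (fun p => (p.1, p.2.items))

-- ===== PORT B =====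
def pvDist (p q : Int × Int) : Int := |p.1 - q.1| + |p.2 - q.2|

-- the two nested loops of Source B: enumerate(items) with the inner loop over items[i+1:]
def pvPairPass : List (String × Int × Int) →
    PySem.Dict String (PySem.Dict String Int) → PySem.Dict String (PySem.Dict String Int)
  | [], res => res
  | (s1, p1) :: rest, res =>
      let res := res.modify s1 PySem.Dict.empty (fun row => row.insert s1 0)
      let res := rest.foldl (fun r q =>
          (r.modify s1 PySem.Dict.empty (fun row => row.insert q.1 (pvDist p1 q.2))).modify
            q.1 PySem.Dict.empty (fun row => row.insert s1 (pvDist p1 q.2))) res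
      pvPairPass rest res

def create_distances_dict_alt (qwerty_positions : List (String × Int × Int)) :
    List (String × List (String × Int)) :=
  let items := (PySem.Dict.ofList qwerty_positions).items
  let res0 := items.foldl (fun r p => r.insert p.1 PySem.Dict.empty) PySem.Dict.empty
  (pvPairPass items res0).items.map (fun p => (p.1, p.2.items))

-- ===== PRECONDITION & SPEC =====
def Spec_create_distances_dict (qwerty_positions : List (String × Int × Int)) (out : List (String × List (String × Int))) : Prop := out = create_distances_dict_alt qwerty_positions
instance (qwerty_positions : List (String × Int × Int)) (out : List (String × List (String × Int))) : Decidable (Spec_create_distances_dict qwerty_positions out) := by unfold Spec_create_distances_dict; infer_instance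

-- ===== CLAIM (what is proved, stated in full; the proofs are below) =====
def Claim_equal_create_distances_dict : Prop := ∀ (qwerty_positions : List (String × Int × Int)), Dom_create_distances_dict qwerty_positions → Spec_create_distances_dict qwerty_positions (create_distances_dict qwerty_positions)

-- ===== LEMMAS AND PROOFS =====

-- the distance row of a point over a list of keyed points
def pvRow (pos : Int × Int) (l : List (String × Int × Int)) : List (String × Int) :=
  l.map (fun q => (q.1, pvDist pos q.2))

-- outer-loop invariant state: rows of `pre` are complete, rows of `t` hold the `pre` prefix
def pvState (full pre t : List (String × Int × Int)) :
    PySem.Dict String (PySem.Dict String Int) :=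
  ⟨pre.map (fun p => (p.1, (⟨pvRow p.2 full⟩ : PySem.Dict String Int))) ++
    t.map (fun p => (p.1, (⟨pvRow p.2 pre⟩ : PySem.Dict String Int)))⟩

-- inner-loop invariant state while processing p after `pre`: inner prefix `u`, remainder `v`
def pvState2 (full pre : List (String × Int × Int)) (p : String × Int × Int)
    (u v : List (String × Int × Int)) : PySem.Dict String (PySem.Dict String Int) :=
  ⟨pre.map (fun w => (w.1, (⟨pvRow w.2 full⟩ : PySem.Dict String Int))) ++
    (p.1, (⟨pvRow p.2 (pre ++ p :: u)⟩ : PySem.Dict String Int)) ::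
      (u.map (fun q => (q.1, (⟨pvRow q.2 (pre ++ [p])⟩ : PySem.Dict String Int))) ++
        v.map (fun q => (q.1, (⟨pvRow q.2 pre⟩ : PySem.Dict String Int))))⟩

theorem insert_mk_fresh {ν : Type} (R : List (String × ν)) (s : String) (v : ν)
    (h : s ∉ R.map Prod.fst) :
    (PySem.Dict.mk R).insert s v = PySem.Dict.mk (R ++ [(s, v)]) := by
  have hc : (PySem.Dict.mk R).contains s = false := by
    simp only [PySem.Dict.contains, List.any_eq_false]
    intro p hp
    simp only [beq_iff_eq]
    exact fun he => h (he ▸ List.mem_map_of_mem hp)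
  show (if (PySem.Dict.mk R).contains s = true then _ else PySem.Dict.mk (R ++ [(s, v)])) = _
  rw [hc]
  simp

theorem modify_mk_middle {ν : Type} (L1 L2 : List (String × ν)) (k : String) (r : ν)
    (dflt : ν) (f : ν → ν) (h1 : k ∉ L1.map Prod.fst) (h2 : k ∉ L2.map Prod.fst) :
    (PySem.Dict.mk (L1 ++ (k, r) :: L2)).modify k dflt f =
      PySem.Dict.mk (L1 ++ (k, f r) :: L2) := by
  have hL1 : ∀ p ∈ L1, (p.1 == k) = false := by
    intro p hp
    simp only [beq_eq_false_iff_ne, ne_eq]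
    exact fun he => h1 (he ▸ List.mem_map_of_mem hp)
  have hL2 : ∀ p ∈ L2, (p.1 == k) = false := by
    intro p hp
    simp only [beq_eq_false_iff_ne, ne_eq]
    exact fun he => h2 (he ▸ List.mem_map_of_mem hp)
  have hfind : (L1 ++ (k, r) :: L2).find? (fun p => p.1 == k) = some (k, r) := by
    rw [List.find?_append]
    have : L1.find? (fun p => p.1 == k) = none := List.find?_eq_none.mpr (by
      intro p hp; simp [hL1 p hp])
    simp [this]
  have hc : (PySem.Dict.mk (L1 ++ (k, r) :: L2)).contains k = true := by
    simp only [PySem.Dict.contains, List.any_eq_true]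
    exact ⟨(k, r), by simp, by simp⟩
  have hget : (PySem.Dict.mk (L1 ++ (k, r) :: L2)).getD k dflt = r := by
    simp [PySem.Dict.getD, PySem.Dict.get?, hfind]
  simp only [PySem.Dict.modify, hget, PySem.Dict.insert, hc, if_true]
  congr 1
  rw [List.map_append, List.map_cons]
  simp only [BEq.rfl, if_true]
  rw [List.map_congr_left (fun p hp => by simp [hL1 p hp] : ∀ p ∈ L1, _ = id p),
      List.map_congr_left (fun p hp => by simp [hL2 p hp] : ∀ p ∈ L2, _ = id p)]
  simp

theorem modify_mk_middle2 {ν : Type} (L1 : List (String × ν)) (x : String × ν)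
    (L2 L3 : List (String × ν)) (k : String) (r : ν) (dflt : ν) (f : ν → ν)
    (h1 : k ∉ L1.map Prod.fst) (hx : k ≠ x.1) (h2 : k ∉ L2.map Prod.fst)
    (h3 : k ∉ L3.map Prod.fst) :
    (PySem.Dict.mk (L1 ++ x :: (L2 ++ (k, r) :: L3))).modify k dflt f =
      PySem.Dict.mk (L1 ++ x :: (L2 ++ (k, f r) :: L3)) := by
  have e : ∀ (w : ν), L1 ++ x :: (L2 ++ (k, w) :: L3) = (L1 ++ x :: L2) ++ (k, w) :: L3 := by
    intro w; simp
  rw [e r, e (f r)]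
  exact modify_mk_middle (L1 ++ x :: L2) L3 k r dflt f
    (by simp only [List.map_append, List.map_cons, List.mem_append, List.mem_cons]
        rintro (h | h | h) <;> [exact h1 h; exact hx h; exact h2 h]) h3

theorem keys_row (pos : Int × Int) (l : List (String × Int × Int)) :
    (pvRow pos l).map Prod.fst = l.map Prod.fst := by simp [pvRow]

theorem keys_entry {β : Type} (l : List (String × Int × Int)) (g : String × Int × Int → β) :
    (l.map (fun w => (w.1, g w))).map Prod.fst = l.map Prod.fst := by simp

theorem row_snoc (pos : Int × Int) (l : List (String × Int × Int)) (q : String × Int × Int) :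
    pvRow pos (l ++ [q]) = pvRow pos l ++ [(q.1, pvDist pos q.2)] := by simp [pvRow]

theorem nodup_split (l1 l2 : List String) (x : String) (h : (l1 ++ x :: l2).Nodup) :
    x ∉ l1 ∧ x ∉ l2 ∧ (l1 ++ l2).Nodup := by
  rw [List.nodup_middle, List.nodup_cons, List.mem_append] at h
  exact ⟨fun hm => h.1 (Or.inl hm), fun hm => h.1 (Or.inr hm), h.2⟩

theorem pvInner (full pre : List (String × Int × Int)) (p : String × Int × Int)
    (u v : List (String × Int × Int)) (hfull : full = pre ++ p :: (u ++ v))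
    (hnd : (full.map Prod.fst).Nodup) :
    v.foldl (fun r q =>
        (r.modify p.1 PySem.Dict.empty (fun row => row.insert q.1 (pvDist p.2 q.2))).modify
          q.1 PySem.Dict.empty (fun row => row.insert p.1 (pvDist p.2 q.2)))
      (pvState2 full pre p u v) = pvState2 full pre p (u ++ v) [] := by
  induction v generalizing u with
  | nil => simp
  | cons q v' ih =>
    rw [List.foldl_cons]
    have hstep :
        ((pvState2 full pre p u (q :: v')).modify p.1 PySem.Dict.empty
            (fun row => row.insert q.1 (pvDist p.2 q.2))).modify q.1 PySem.Dict.empty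
            (fun row => row.insert p.1 (pvDist p.2 q.2)) =
          pvState2 full pre p (u ++ [q]) v' := by
      -- extract the key-disjointness facts
      have h0 : ((pre.map Prod.fst) ++ p.1 :: ((u.map Prod.fst) ++ q.1 :: (v'.map Prod.fst))).Nodup := by
        have h := hnd; rw [hfull] at h; simpa using h
      obtain ⟨hpP, hpR, h1⟩ := nodup_split _ _ _ h0
      have hpU : p.1 ∉ u.map Prod.fst := fun hm => hpR (by simp [hm])
      have hpq : p.1 ≠ q.1 := fun hm => hpR (by simp [hm])
      have hpV : p.1 ∉ v'.map Prod.fst := fun hm => hpR (by simp [hm])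
      have h1' : (((pre.map Prod.fst) ++ (u.map Prod.fst)) ++ q.1 :: (v'.map Prod.fst)).Nodup := by
        simpa [List.append_assoc] using h1
      obtain ⟨hqPU, hqV, _⟩ := nodup_split _ _ _ h1'
      have hqP : q.1 ∉ pre.map Prod.fst := fun hm => hqPU (by simp [hm])
      have hqU : q.1 ∉ u.map Prod.fst := fun hm => hqPU (by simp [hm])
      -- first modify: extend p's row by q
      rw [show pvState2 full pre p u (q :: v') =
          PySem.Dict.mk ((pre.map (fun w => (w.1, (⟨pvRow w.2 full⟩ : PySem.Dict String Int)))) ++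
            (p.1, (⟨pvRow p.2 (pre ++ p :: u)⟩ : PySem.Dict String Int)) ::
              (u.map (fun q => (q.1, (⟨pvRow q.2 (pre ++ [p])⟩ : PySem.Dict String Int))) ++
                (q.1, (⟨pvRow q.2 pre⟩ : PySem.Dict String Int)) ::
                v'.map (fun q => (q.1, (⟨pvRow q.2 pre⟩ : PySem.Dict String Int))))) from by
        simp [pvState2]]
      rw [modify_mk_middle _ _ _ _ _ _
        (by rw [keys_entry]; exact hpP)
        (by simp only [List.map_append, List.map_cons, List.mem_append, List.mem_cons, keys_entry]
            rintro (h | h | h)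
            · exact hpU h
            · exact hpq h
            · exact hpV (by simpa [keys_entry] using h))]
      rw [show ((⟨pvRow p.2 (pre ++ p :: u)⟩ : PySem.Dict String Int)).insert q.1 (pvDist p.2 q.2) =
          (⟨pvRow p.2 (pre ++ p :: (u ++ [q]))⟩ : PySem.Dict String Int) from by
        rw [insert_mk_fresh _ _ _ (by
          rw [keys_row]
          simp only [List.map_append, List.map_cons, List.mem_append, List.mem_cons]
          rintro (h | h | h)
          · exact hqP h
          · exact hpq h.symm
          · exact hqU h)]
        congr 1
        rw [show pre ++ p :: (u ++ [q]) = (pre ++ p :: u) ++ [q] from by simp,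
          row_snoc]]
      -- second modify: extend q's row by p
      rw [modify_mk_middle2
        (pre.map (fun w => (w.1, (⟨pvRow w.2 full⟩ : PySem.Dict String Int))))
        (p.1, (⟨pvRow p.2 (pre ++ p :: (u ++ [q]))⟩ : PySem.Dict String Int))
        (u.map (fun q => (q.1, (⟨pvRow q.2 (pre ++ [p])⟩ : PySem.Dict String Int))))
        (v'.map (fun q => (q.1, (⟨pvRow q.2 pre⟩ : PySem.Dict String Int))))
        q.1 (⟨pvRow q.2 pre⟩ : PySem.Dict String Int) PySem.Dict.empty
        (fun row => row.insert p.1 (pvDist p.2 q.2))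
        (by rw [keys_entry]; exact hqP) (Ne.symm hpq)
        (by rw [keys_entry]; exact hqU)
        (by rw [keys_entry]; exact hqV)]
      rw [show ((⟨pvRow q.2 pre⟩ : PySem.Dict String Int)).insert p.1 (pvDist p.2 q.2) =
          (⟨pvRow q.2 (pre ++ [p])⟩ : PySem.Dict String Int) from by
        rw [insert_mk_fresh _ _ _ (by rw [keys_row]; exact hpP), row_snoc,
          show pvDist q.2 p.2 = pvDist p.2 q.2 from by simp [pvDist, abs_sub_comm]]]
      simp [pvState2]
    rw [hstep, ih (u ++ [q]) (by simpa using hfull)]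
    simp

theorem pvPass (full : List (String × Int × Int)) (hnd : (full.map Prod.fst).Nodup) :
    ∀ pre t, full = pre ++ t → pvPairPass t (pvState full pre t) = pvState full full [] := by
  intro pre t
  induction t generalizing pre with
  | nil =>
    intro h
    have : pre = full := by simpa using h.symm
    subst this
    rfl
  | cons p t' ih =>
    intro hfull
    obtain ⟨s1, pos1⟩ := p
    have h0 : ((pre.map Prod.fst) ++ s1 :: (t'.map Prod.fst)).Nodup := by
      have h := hnd; rw [hfull] at h; simpa using h
    obtain ⟨hsP, hsT, _⟩ := nodup_split _ _ _ h0
    show pvPairPass ((s1, pos1) :: t') (pvState full pre ((s1, pos1) :: t')) = _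
    rw [pvPairPass]
    have hdiag : (pvState full pre ((s1, pos1) :: t')).modify s1 PySem.Dict.empty
        (fun row => row.insert s1 0) = pvState2 full pre (s1, pos1) [] t' := by
      rw [show pvState full pre ((s1, pos1) :: t') =
          PySem.Dict.mk ((pre.map (fun w => (w.1, (⟨pvRow w.2 full⟩ : PySem.Dict String Int)))) ++
            (s1, (⟨pvRow pos1 pre⟩ : PySem.Dict String Int)) ::
              t'.map (fun q => (q.1, (⟨pvRow q.2 pre⟩ : PySem.Dict String Int)))) from by
        simp [pvState]]
      rw [modify_mk_middle _ _ _ _ _ _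
        (by rw [keys_entry]; exact hsP)
        (by rw [keys_entry]; exact hsT)]
      rw [show ((⟨pvRow pos1 pre⟩ : PySem.Dict String Int)).insert s1 0 =
          (⟨pvRow pos1 (pre ++ [(s1, pos1)])⟩ : PySem.Dict String Int) from by
        rw [insert_mk_fresh _ _ _ (by rw [keys_row]; exact hsP), row_snoc]
        simp [pvDist]]
      simp [pvState2]
    rw [hdiag]
    rw [pvInner full pre (s1, pos1) [] t' (by simpa using hfull) hnd]
    rw [show pvState2 full pre (s1, pos1) ([] ++ t') [] =
        pvState full (pre ++ [(s1, pos1)]) t' from by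
      simp [pvState2, pvState, hfull]]
    exact ih (pre ++ [(s1, pos1)]) (by rw [hfull]; simp)

theorem pvInit (full : List (String × Int × Int)) (hnd : (full.map Prod.fst).Nodup) :
    full.foldl (fun r p => r.insert p.1 PySem.Dict.empty) PySem.Dict.empty =
      pvState full [] full := by
  apply PySem.Dict.ext
  rw [PySem.Dict.items_foldl_insert_fresh full (fun p => p.1)
    (fun _ => PySem.Dict.empty) PySem.Dict.empty (by intro a _; simp)
    (by simpa using hnd)]
  simp [pvState, pvRow, PySem.Dict.empty]

theorem A_closed (l : List (String × Int × Int)) :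
    create_distances_dict l =
      (PySem.Dict.ofList l).items.map
        (fun p => (p.1, pvRow p.2 (PySem.Dict.ofList l).items)) := by
  have hnd : (PySem.Dict.ofList l).keys.Nodup := PySem.Dict.nodup_keys_ofList l
  have hndk : (((PySem.Dict.ofList l).keys.map (fun s => s)).Nodup) := by simp
  simp only [create_distances_dict]
  have hinner : ∀ s1 : String,
      (PySem.Dict.ofList l).keys.foldl (fun n s2 =>
          n.insert s2 (distance_between_symbols s1 s2 (PySem.Dict.ofList l))) PySem.Dict.empty =
        PySem.Dict.mk ((PySem.Dict.ofList l).keys.map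
          (fun s2 => (s2, distance_between_symbols s1 s2 (PySem.Dict.ofList l)))) := by
    intro s1
    apply PySem.Dict.ext
    rw [PySem.Dict.items_foldl_insert_fresh (PySem.Dict.ofList l).keys (fun s => s)
      (fun s2 => distance_between_symbols s1 s2 (PySem.Dict.ofList l)) PySem.Dict.empty
      (by intro a _; simp) hndk]
    simp [PySem.Dict.empty]
  have houter :
      ((PySem.Dict.ofList l).keys.foldl (fun d s1 =>
          d.insert s1 ((PySem.Dict.ofList l).keys.foldl (fun n s2 =>
              n.insert s2 (distance_between_symbols s1 s2 (PySem.Dict.ofList l)))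
            PySem.Dict.empty)) PySem.Dict.empty).items =
        (PySem.Dict.ofList l).keys.map (fun s1 => (s1,
          PySem.Dict.mk ((PySem.Dict.ofList l).keys.map
            (fun s2 => (s2, distance_between_symbols s1 s2 (PySem.Dict.ofList l)))))) := by
    rw [PySem.Dict.items_foldl_insert_fresh (PySem.Dict.ofList l).keys (fun s => s)
      (fun s1 => (PySem.Dict.ofList l).keys.foldl (fun n s2 =>
          n.insert s2 (distance_between_symbols s1 s2 (PySem.Dict.ofList l))) PySem.Dict.empty)
      PySem.Dict.empty (by intro a _; simp) hndk]
    rw [show (PySem.Dict.empty : PySem.Dict String (PySem.Dict String Int)).items = [] from rfl,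
      List.nil_append]
    exact List.map_congr_left (fun s1 _ => by rw [hinner s1])
  rw [houter, List.map_map]
  simp only [PySem.Dict.keys]
  rw [List.map_map]
  apply List.map_congr_left
  intro p hp
  simp only [Function.comp]
  congr 1
  rw [List.map_map]
  unfold pvRow
  apply List.map_congr_left
  intro q hq
  simp only [Function.comp]
  have hgp : (PySem.Dict.ofList l).getD p.1 (0, 0) = p.2 :=
    PySem.Dict.getD_of_mem_items _ (by simpa using hp) hnd _
  have hgq : (PySem.Dict.ofList l).getD q.1 (0, 0) = q.2 :=
    PySem.Dict.getD_of_mem_items _ (by simpa using hq) hnd _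
  simp [distance_between_symbols, hgp, hgq, pvDist]

-- ===== VERDICT (by name: the statement is the Claim_ definition above) =====
theorem create_distances_dict_spec : Claim_equal_create_distances_dict := by
  intro l _
  unfold Spec_create_distances_dict
  have hnd : (((PySem.Dict.ofList l).items.map Prod.fst).Nodup) := by
    have := PySem.Dict.nodup_keys_ofList l
    simpa [PySem.Dict.keys] using this
  rw [A_closed l]
  simp only [create_distances_dict_alt]
  rw [pvInit _ hnd, pvPass _ hnd [] _ rfl]
  simp [pvState]
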